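-- pv_equiv track=rewrite | github.com/RedBearAK/PDF-Manipulator | tests/test_smart_comma_support.py | _is_quoted_content
-- ===== SOURCE A (Python) =====
-- def _is_quoted_content(text: str, search_text: str) -> bool:
--     """Check if search_text is inside quotes."""
--     for quote in ['"', "'"]:
--         if quote in text:
--             parts = text.split(quote)
--             for i in range(1, len(parts), 2):  # Check odd indices (inside quotes)
--                 if search_text in parts[i]:
--                     return True
--     return False
-- ===== SOURCE B (Python) =====
-- def _is_quoted_content(text: str, search_text: str) -> bool:
--     """Check if search_text is inside quotes."""
--     for quote in ('"', "'"):
--         in_quote = False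
--         seg = ""
--         for ch in text:
--             if ch == quote:
--                 if in_quote and search_text in seg:
--                     return True
--                 seg = ""
--                 in_quote = not in_quote
--             elif in_quote:
--                 seg += ch
--         if in_quote and search_text in seg:
--             return True
--     return False
-- ===== Notes on version B (the rewrite author's own statement) =====
-- stated objective: alternative
-- what changed: Replaces the split-into-parts-then-check-odd-indices pass with a single character scan per quote type that maintains an in_quote flag and the current quoted segment, testing each segment (and the trailing unmatched one) as it closes.
import Mathlib
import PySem

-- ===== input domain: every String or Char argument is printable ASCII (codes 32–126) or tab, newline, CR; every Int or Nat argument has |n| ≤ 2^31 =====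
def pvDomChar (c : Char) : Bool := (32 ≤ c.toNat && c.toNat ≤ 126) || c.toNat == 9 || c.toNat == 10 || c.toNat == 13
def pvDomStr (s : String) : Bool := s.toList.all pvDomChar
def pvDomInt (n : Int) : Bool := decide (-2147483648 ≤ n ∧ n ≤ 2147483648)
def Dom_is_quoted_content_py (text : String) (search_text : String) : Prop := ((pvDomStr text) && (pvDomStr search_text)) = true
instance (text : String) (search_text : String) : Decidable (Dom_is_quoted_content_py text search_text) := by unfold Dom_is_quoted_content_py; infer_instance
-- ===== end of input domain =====

-- B replaces A's split-then-check-odd-parts pass by a per-quote character scan with an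
-- in_quote flag and a running segment accumulator (alternative decomposition, same cost).

-- ===== PORT A =====
-- literal port of A: for each quote, if it occurs, split and test the odd-index parts
def is_quoted_content_py (text : String) (search_text : String) : Bool :=
  ["\"", "'"].any (fun quote =>
    if PySem.Str.isIn quote text then
      match PySem.Str.split? text quote with
      | some parts =>
          (PySem.List.pyRange 1 (parts.length : Int) 2).any (fun i =>
            (PySem.List.pyGet? parts i).elim false (fun p => PySem.Str.isIn search_text p))
      | none => false
    else false)

-- ===== PORT B =====
-- literal port of B's inner loop: scan the characters, keeping (in_quote, seg)
def pvScanB (q : Char) (search : List Char) : List Char → Bool → List Char → Bool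
  | [], inq, seg => inq && PySem.Chars.isIn search seg
  | c :: rest, inq, seg =>
      if c == q then
        if inq && PySem.Chars.isIn search seg then true
        else pvScanB q search rest (!inq) []
      else
        pvScanB q search rest inq (if inq then seg ++ [c] else seg)

def is_quoted_content_py_alt (text : String) (search_text : String) : Bool :=
  ['"', '\''].any (fun q => pvScanB q search_text.toList text.toList false [])

-- ===== PRECONDITION & SPEC =====
def Spec_is_quoted_content_py (text : String) (search_text : String) (out : Bool) : Prop := out = is_quoted_content_py_alt text search_text
instance (text : String) (search_text : String) (out : Bool) : Decidable (Spec_is_quoted_content_py text search_text out) := by unfold Spec_is_quoted_content_py; infer_instance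

-- ===== CLAIM (what is proved, stated in full; the proofs are below) =====
def Claim_equal_is_quoted_content_py : Prop := ∀ (text : String) (search_text : String), Dom_is_quoted_content_py text search_text → Spec_is_quoted_content_py text search_text (is_quoted_content_py text search_text)

-- ===== LEMMAS AND PROOFS =====

-- split on a single character, recursively (proof-side reference function)
def pvSplit1 (q : Char) : List Char → List (List Char)
  | [] => [[]]
  | c :: cs =>
      if c = q then [] :: pvSplit1 q cs
      else
        match pvSplit1 q cs with
        | [] => [[c]]
        | p :: ps => (c :: p) :: ps

-- elements at odd indices
def pvOdds {α : Type} : List α → List α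
  | [] => []
  | [_] => []
  | _ :: b :: t => b :: pvOdds t

def pvWithHead {α : Type} (pre : List α) : List (List α) → List (List α)
  | [] => [pre]
  | p :: ps => (pre ++ p) :: ps

theorem pvSplit1_ne_nil (q : Char) (cs : List Char) : pvSplit1 q cs ≠ [] := by
  induction cs with
  | nil => simp [pvSplit1]
  | cons c cs ih =>
    simp only [pvSplit1]
    split
    · simp
    · cases h : pvSplit1 q cs with
      | nil => simp
      | cons p ps => simp

theorem pvGo_eq (q : Char) : ∀ (fuel : Nat) (l cur : List Char) (acc : List (List Char)),
    l.length ≤ fuel →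
    PySem.Chars.splitOn.go [q] fuel l cur acc = acc.reverse ++ pvWithHead cur.reverse (pvSplit1 q l) := by
  intro fuel
  induction fuel with
  | zero =>
    intro l cur acc h
    have : l = [] := by cases l <;> simp_all
    subst this
    simp [PySem.Chars.splitOn.go, pvSplit1, pvWithHead]
  | succ fuel ih =>
    intro l cur acc h
    cases l with
    | nil => simp [PySem.Chars.splitOn.go, pvSplit1, pvWithHead]
    | cons c rest =>
      simp only [PySem.Chars.splitOn.go]
      by_cases hc : c = q
      · subst hc
        have hp : List.isPrefixOf [c] (c :: rest) = true := by simp [List.isPrefixOf]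
        rw [if_pos hp]
        have hd : List.drop ([c].length) (c :: rest) = rest := by simp
        rw [hd, ih rest [] (cur.reverse :: acc) (by simp at h; omega)]
        simp only [pvSplit1]
        cases hs : pvSplit1 c rest with
        | nil => exact absurd hs (pvSplit1_ne_nil c rest)
        | cons p ps => simp [pvWithHead]
      · have hp : ¬ (List.isPrefixOf [q] (c :: rest) = true) := by
          simp [List.isPrefixOf]
          intro h'; exact absurd h'.symm hc
        rw [if_neg hp, ih rest (c :: cur) acc (by simp at h ⊢; omega)]
        simp only [pvSplit1, if_neg hc]
        cases hs : pvSplit1 q rest with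
        | nil => exact absurd hs (pvSplit1_ne_nil q rest)
        | cons p ps => simp [pvWithHead]

theorem pvSplitOn_eq (q : Char) (cs : List Char) :
    PySem.Chars.splitOn cs [q] = pvSplit1 q cs := by
  have := pvGo_eq q (cs.length + 1) cs [] [] (by omega)
  cases hs : pvSplit1 q cs with
  | nil => exact absurd hs (pvSplit1_ne_nil q cs)
  | cons p ps => simpa [PySem.Chars.splitOn, pvWithHead, hs] using this

theorem pvSplit1_not_mem (q : Char) (cs : List Char) (h : q ∉ cs) : pvSplit1 q cs = [cs] := by
  induction cs with
  | nil => rfl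
  | cons c cs ih =>
    simp only [List.mem_cons, not_or] at h
    simp [pvSplit1, Ne.symm h.1, ih h.2]

-- B's scan, characterised by the split of the remaining text
theorem pvScanB_eq (q : Char) (search : List Char) : ∀ (cs : List Char) (inq : Bool) (seg : List Char),
    pvScanB q search cs inq seg =
      match pvSplit1 q cs with
      | [] => false
      | p :: ps =>
          if inq then (PySem.Chars.isIn search (seg ++ p) || (pvOdds ps).any (PySem.Chars.isIn search))
          else (pvOdds (p :: ps)).any (PySem.Chars.isIn search) := by
  intro cs
  induction cs with
  | nil =>
    intro inq seg
    cases inq <;> simp [pvScanB, pvSplit1, pvOdds]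
  | cons c rest ih =>
    intro inq seg
    by_cases hc : c = q
    · subst hc
      simp only [pvScanB, beq_self_eq_true, if_pos, pvSplit1]
      cases hs : pvSplit1 c rest with
      | nil => exact absurd hs (pvSplit1_ne_nil c rest)
      | cons p ps =>
        cases inq with
        | false => simp [ih, hs, pvOdds]
        | true =>
          by_cases hIn : PySem.Chars.isIn search seg = true
          · simp [hIn]
          · simp only [Bool.true_and, hIn, ih, hs]
            simp at hIn
            simp [hIn]
    · have hb : (c == q) = false := by simp [hc]
      simp only [pvScanB, hb, Bool.false_eq_true, ih, pvSplit1, if_neg hc]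
      cases hs : pvSplit1 q rest with
      | nil => exact absurd hs (pvSplit1_ne_nil q rest)
      | cons p ps =>
        cases inq with
        | true => simp
        | false => cases ps <;> simp [pvOdds]

theorem pvRange12 (m : Nat) :
    PySem.List.pyRange 1 (m : Int) 2 = (List.range (m / 2)).map (fun k : Nat => (1 + 2 * k : Int)) := by
  rw [PySem.List.pyRange_of_pos _ _ (by norm_num)]
  have : (if (1 : Int) < (m : Int) then (((m : Int) - 1 + 2 - 1) / 2).toNat else 0) = m / 2 := by
    split <;> omega
  rw [this]

theorem pvAnyNat {α : Type} (f : α → Bool) : ∀ (parts : List α),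
    (List.range (parts.length / 2)).any (fun k => (parts[1 + 2 * k]?).elim false f)
      = (pvOdds parts).any f := by
  intro parts
  induction parts using pvOdds.induct with
  | case1 => simp [pvOdds]
  | case2 a => simp [pvOdds]
  | case3 a b t ih =>
    simp only [List.length_cons]
    have h2 : (t.length + 1 + 1) / 2 = t.length / 2 + 1 := by omega
    rw [h2, List.range_succ_eq_map, List.any_cons, List.any_map]
    have hgb : ((a :: b :: t)[1 + 2 * 0]?).elim false f = f b := by simp
    have hgs : ∀ k : Nat, (a :: b :: t)[1 + 2 * (k + 1)]? = t[1 + 2 * k]? := by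
      intro k
      have : 1 + 2 * (k + 1) = (1 + 2 * k) + 1 + 1 := by ring
      rw [this, List.getElem?_cons_succ, List.getElem?_cons_succ]
    rw [hgb]
    have hcomp : (List.range (t.length / 2)).any
        ((fun k => ((a :: b :: t)[1 + 2 * k]?).elim false f) ∘ Nat.succ)
        = (pvOdds t).any f := by
      rw [← ih]
      refine List.any_congr rfl (fun k => ?_)
      simp only [Function.comp_apply, Nat.succ_eq_add_one, hgs k]
    rw [hcomp]
    simp [pvOdds]

theorem pvGet_map {α β : Type} (g : α → β) (l : List α) (i : Int) :
    PySem.List.pyGet? (l.map g) i = (PySem.List.pyGet? l i).map g := by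
  simp [PySem.List.pyGet?]

-- the whole per-quote body of A equals B's per-quote scan
theorem pvQuote_eq (quote : String) (q : Char) (hq : quote.toList = [q]) (text search : String) :
    (if PySem.Str.isIn quote text then
       match PySem.Str.split? text quote with
       | some parts =>
           (PySem.List.pyRange 1 (parts.length : Int) 2).any (fun i =>
             (PySem.List.pyGet? parts i).elim false (fun p => PySem.Str.isIn search p))
       | none => false
     else false) = pvScanB q search.toList text.toList false [] := by
  rw [pvScanB_eq]
  cases hs : pvSplit1 q text.toList with
  | nil => exact absurd hs (pvSplit1_ne_nil q text.toList)
  | cons p ps =>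
    by_cases hIn : PySem.Str.isIn quote text = true
    · rw [if_pos hIn]
      have hsplit : PySem.Str.split? text quote
          = some ((pvSplit1 q text.toList).map String.ofList) := by
        simp [PySem.Str.split?, PySem.Chars.split?, hq, pvSplitOn_eq]
      rw [hsplit]
      simp only [List.length_map, pvRange12, List.any_map]
      have hpt : ∀ i : Nat,
          ((fun i => (PySem.List.pyGet? ((pvSplit1 q text.toList).map String.ofList) i).elim false
              (fun p => PySem.Str.isIn search p)) ∘ (fun k : Nat => (1 + 2 * k : Int)))
            i
          = ((pvSplit1 q text.toList)[1 + 2 * i]?).elim false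
              (fun pl => PySem.Chars.isIn search.toList pl) := by
        intro k
        have hcast : ((1 : Int) + 2 * (k : Int)) = ((1 + 2 * k : Nat) : Int) := by push_cast; ring
        simp only [Function.comp_apply, hcast, pvGet_map, PySem.List.pyGet?_natCast]
        cases h : (pvSplit1 q text.toList)[1 + 2 * k]? <;> simp
      rw [List.any_congr rfl hpt, pvAnyNat, hs]
      simp
    · rw [if_neg hIn]
      have hmem : q ∉ text.toList := by
        intro hm
        apply hIn
        rw [PySem.Str.isIn_iff_infix, hq]
        exact (List.singleton_infix_iff q text.toList).mpr hm
      have := pvSplit1_not_mem q text.toList hmem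
      rw [this] at hs
      cases hs
      simp [pvOdds]

theorem is_quoted_content_py_spec : Claim_equal_is_quoted_content_py := by
  intro text search_text _
  unfold Spec_is_quoted_content_py is_quoted_content_py is_quoted_content_py_alt
  simp only [List.any_cons, List.any_nil]
  rw [pvQuote_eq "\"" '"' rfl text search_text, pvQuote_eq "'" '\'' rfl text search_text]
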